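-- pv_equiv track=rewrite | github.com/mtyrolski/todoist-assistant | todoist/database/dataframe.py | _find_duplicate_project_names
-- ===== SOURCE A (Python) =====
-- from collections import Counter, defaultdict
--
-- def _find_duplicate_project_names(
--     mapping_project_id_to_name: dict[str, str]
-- ) -> dict[str, list[str]]:
--     grouped_ids: dict[str, list[str]] = defaultdict(list)
--     for project_id, project_name in mapping_project_id_to_name.items():
--         grouped_ids[project_name].append(project_id)
--     return {
--         project_name: sorted(project_ids)
--         for project_name, project_ids in grouped_ids.items()
--         if len(project_ids) > 1
--     }
-- ===== SOURCE B (Python) =====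
-- def _find_duplicate_project_names(mapping_project_id_to_name):
--     out = {}
--     for name in dict.fromkeys(mapping_project_id_to_name.values()):
--         ids = sorted(pid for pid, n in mapping_project_id_to_name.items() if n == name)
--         if len(ids) > 1:
--             out[name] = ids
--     return out
-- ===== Notes on version B (the rewrite author's own statement) =====
-- stated objective: alternative
-- what changed: B drops the defaultdict accumulation entirely: it walks the distinct names in first-occurrence order and, per name, gathers its ids by a filtering pass over the mapping, sorting and keeping the group only if it has more than one id.
import Mathlib
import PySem

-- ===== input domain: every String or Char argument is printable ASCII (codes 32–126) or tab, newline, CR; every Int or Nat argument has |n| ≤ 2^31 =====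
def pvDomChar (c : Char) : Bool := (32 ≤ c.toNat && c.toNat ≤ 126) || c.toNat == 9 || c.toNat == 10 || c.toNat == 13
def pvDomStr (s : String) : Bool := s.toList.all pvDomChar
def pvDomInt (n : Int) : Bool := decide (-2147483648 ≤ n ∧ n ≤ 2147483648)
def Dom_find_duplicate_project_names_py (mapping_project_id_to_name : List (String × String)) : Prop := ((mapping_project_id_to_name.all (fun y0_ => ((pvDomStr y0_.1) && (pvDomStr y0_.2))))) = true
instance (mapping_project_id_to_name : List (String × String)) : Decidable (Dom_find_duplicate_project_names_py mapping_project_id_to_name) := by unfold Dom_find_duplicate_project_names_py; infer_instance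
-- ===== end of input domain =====

-- B replaces the defaultdict accumulation + per-group sort by a walk over the distinct
-- names (first-occurrence order) with a filtering pass per name; alternative decomposition,
-- same results, not claimed faster.

-- ===== PORT A =====
def find_duplicate_project_names_py (mapping_project_id_to_name : List (String × String)) : List (String × List String) :=
  -- grouped_ids[project_name].append(project_id) over items; then the dict comprehension:
  -- keep groups with more than one id, sorted
  (mapping_project_id_to_name.foldl
      (fun d p => d.modify p.2 [] (fun v => v ++ [p.1]))
      (PySem.Dict.empty : PySem.Dict String (List String))).items.foldl
    (fun acc p => if p.2.length > 1 then acc ++ [(p.1, PySem.List.sorted p.2 (fun x => x) false)] else acc) []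

-- ===== PORT B =====
def find_duplicate_project_names_py_alt (mapping_project_id_to_name : List (String × String)) : List (String × List String) :=
  -- for name in dict.fromkeys(values): ids = sorted(pid for pid, n in items if n == name)
  (PySem.List.dedup (mapping_project_id_to_name.map Prod.snd)).foldl
    (fun out name =>
      if (PySem.List.sorted ((mapping_project_id_to_name.filter (fun p => p.2 == name)).map Prod.fst) (fun x => x) false).length > 1
      then out ++ [(name, PySem.List.sorted ((mapping_project_id_to_name.filter (fun p => p.2 == name)).map Prod.fst) (fun x => x) false)]
      else out) []

-- ===== PRECONDITION & SPEC =====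
def Spec_find_duplicate_project_names_py (mapping_project_id_to_name : List (String × String)) (out : List (String × List String)) : Prop := out = find_duplicate_project_names_py_alt mapping_project_id_to_name
instance (mapping_project_id_to_name : List (String × String)) (out : List (String × List String)) : Decidable (Spec_find_duplicate_project_names_py mapping_project_id_to_name out) := by unfold Spec_find_duplicate_project_names_py; infer_instance

-- ===== CLAIM (what is proved, stated in full; the proofs are below) =====
def Claim_equal_find_duplicate_project_names_py : Prop := ∀ (mapping_project_id_to_name : List (String × String)), Dom_find_duplicate_project_names_py mapping_project_id_to_name → Spec_find_duplicate_project_names_py mapping_project_id_to_name (find_duplicate_project_names_py mapping_project_id_to_name)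

-- ===== LEMMAS AND PROOFS =====

-- the ids collected for a given name, in mapping order (shared description of both ports)
def pvGroup (m : List (String × String)) (n : String) : List String :=
  (m.filter (fun p => p.2 == n)).map Prod.fst

-- A's grouping fold, rewritten over the swapped pair list (to match the PySem grouping lemmas)
lemma grouped_eq_swap (m : List (String × String)) :
    m.foldl (fun d p => d.modify p.2 [] (fun v => v ++ [p.1])) (PySem.Dict.empty : PySem.Dict String (List String))
    = (m.map (fun p => (p.2, p.1))).foldl (fun (d : PySem.Dict String (List String)) (p : String × String) => d.modify p.1 [] (fun v => v ++ [p.2])) PySem.Dict.empty := by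
  rw [List.foldl_map]

lemma grouped_items_eq (m : List (String × String)) :
    (m.foldl (fun d p => d.modify p.2 [] (fun v => v ++ [p.1])) (PySem.Dict.empty : PySem.Dict String (List String))).items
    = (PySem.List.dedup (m.map Prod.snd)).map (fun n => (n, pvGroup m n)) := by
  rw [grouped_eq_swap]
  set l := m.map (fun p => (p.2, p.1)) with hl
  have hnd : ((l.foldl (fun (d : PySem.Dict String (List String)) (p : String × String) => d.modify p.1 [] (fun v => v ++ [p.2])) (PySem.Dict.empty : PySem.Dict String (List String)))).keys.Nodup := by
    have := PySem.Dict.nodup_keys_foldl_modify_key (l := l) (key := Prod.fst)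
      (d0 := ([] : List String)) (f := fun _ p => fun v => v ++ [p.2]) (d := PySem.Dict.empty)
      (by simp [PySem.Dict.keys_empty])
    exact this
  rw [PySem.Dict.items_eq_map_keys _ hnd ([] : List String)]
  have hkeys : ((l.foldl (fun (d : PySem.Dict String (List String)) (p : String × String) => d.modify p.1 [] (fun v => v ++ [p.2])) (PySem.Dict.empty : PySem.Dict String (List String)))).keys
      = PySem.List.dedup (m.map Prod.snd) := by
    rw [PySem.Dict.keys_foldl_modify_key]
    simp [hl, PySem.Dict.keys_empty, PySem.Set.update_nil_left, List.map_map]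
    rfl
  rw [hkeys]
  apply List.map_congr_left
  intro n _
  congr 1
  rw [PySem.Dict.getD_foldl_modify_append, PySem.Dict.getD_empty]
  simp [hl, pvGroup, List.filter_map, Function.comp_def, List.map_map]

-- ===== VERDICT (by name: the statement is the Claim_ definition above) =====
theorem find_duplicate_project_names_py_spec : Claim_equal_find_duplicate_project_names_py := by
  intro m _
  unfold Spec_find_duplicate_project_names_py find_duplicate_project_names_py find_duplicate_project_names_py_alt
  rw [grouped_items_eq, List.foldl_map]
  apply PySem.List.foldl_congr_mem
  intro acc n _
  simp only [pvGroup, PySem.List.length_sorted]
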